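-- pv_equiv track=rewrite | github.com/gnarlyman/oblivion-reborn | research/download_nexus_deps.py | pick_main_file
-- ===== SOURCE A (Python) =====
-- def pick_main_file(files_json):
--     """Pick the most recent main-file (category_id == 1)."""
--     files = files_json.get("files", [])
--     mains = [f for f in files if f.get("category_id") == 1]
--     if not mains:
--         # Fall back to any file
--         mains = files
--     if not mains:
--         return None
--     # Most recent uploaded_timestamp wins
--     mains.sort(key=lambda f: f.get("uploaded_timestamp", 0), reverse=True)
--     return mains[0]
-- ===== SOURCE B (Python) =====
-- def pick_main_file(files_json):
--     """Pick the most recent main-file (category_id == 1).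
--
--     Single pass: keep the first-seen entry with the strictly largest
--     uploaded_timestamp, once among main files and once among all files,
--     and fall back to the latter when no main file exists.
--     (Unlike A, this never mutates files_json["files"] in place.)
--     """
--     best_main = None  # (file, ts)
--     best_any = None   # (file, ts)
--     for f in files_json.get("files", []):
--         ts = f.get("uploaded_timestamp", 0)
--         if best_any is None or ts > best_any[1]:
--             best_any = (f, ts)
--         if f.get("category_id") == 1 and (best_main is None or ts > best_main[1]):
--             best_main = (f, ts)
--     winner = best_main if best_main is not None else best_any
--     return winner[0] if winner is not None else None
-- ===== Notes on version B (the rewrite author's own statement) =====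
-- stated objective: alternative
-- what changed: Replaces build-filtered-list + stable reverse sort + take-head with one fused single pass that keeps two running candidates (best main file, best file overall) updated only on a strictly larger timestamp, so ties still resolve to the earliest entry; no intermediate lists are built and, unlike A, nothing is mutated in place.
import Mathlib
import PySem

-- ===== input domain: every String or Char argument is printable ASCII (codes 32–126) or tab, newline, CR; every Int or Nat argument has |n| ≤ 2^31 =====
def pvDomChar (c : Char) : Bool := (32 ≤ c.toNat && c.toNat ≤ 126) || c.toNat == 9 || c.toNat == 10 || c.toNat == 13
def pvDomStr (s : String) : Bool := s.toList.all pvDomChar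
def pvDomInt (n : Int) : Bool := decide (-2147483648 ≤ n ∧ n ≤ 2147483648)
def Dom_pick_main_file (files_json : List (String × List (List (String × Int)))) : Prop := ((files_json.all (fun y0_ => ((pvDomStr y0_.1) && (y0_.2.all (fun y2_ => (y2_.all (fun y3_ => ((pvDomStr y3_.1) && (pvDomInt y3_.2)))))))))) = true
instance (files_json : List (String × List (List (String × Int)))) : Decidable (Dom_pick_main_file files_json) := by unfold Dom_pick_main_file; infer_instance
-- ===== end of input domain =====

-- B replaces A's filter + stable reverse-sort + take-head by one fused single pass keeping two
-- running first-max candidates (objective: alternative). Return values agree everywhere; only A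
-- sorts files_json["files"] in place in the fallback case (the equivalence is about return values).

-- a file entry (a Python dict str -> int)
abbrev pvFile : Type := List (String × Int)

-- shared helpers: the two lambdas/tests both Pythons apply to a file entry
def pvKey (f : pvFile) : Int := PySem.Dict.getD (PySem.Dict.mk f) "uploaded_timestamp" (0:Int)
def pvIsMain (f : pvFile) : Bool := (PySem.Dict.get? (PySem.Dict.mk f) "category_id" : Option Int) == some 1

-- ===== PORT A =====
def pick_main_file (files_json : List (String × List (List (String × Int)))) : Option (List (String × Int)) :=
  let files := PySem.Dict.getD (PySem.Dict.mk files_json) "files" ([] : List pvFile)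
  let mains := files.filter pvIsMain
  let mains := if mains = [] then files else mains
  if mains = [] then none
  else PySem.List.pyGet? (PySem.List.sorted mains pvKey true) 0

-- ===== PORT B =====
-- 'best_any is None or ts > best_any[1]' update step of Source B (also used, guarded, for best_main)
def pvBest (st : Option (pvFile × Int)) (f : pvFile) : Option (pvFile × Int) :=
  match st with
  | none => some (f, pvKey f)
  | some (m, ts) => if ts < pvKey f then some (f, pvKey f) else some (m, ts)

def pick_main_file_alt (files_json : List (String × List (List (String × Int)))) : Option (List (String × Int)) :=
  let files := PySem.Dict.getD (PySem.Dict.mk files_json) "files" ([] : List pvFile)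
  let st := files.foldl
    (fun (st : Option (pvFile × Int) × Option (pvFile × Int)) f =>
      (if pvIsMain f then pvBest st.1 f else st.1, pvBest st.2 f))
    (none, none)
  match st.1 with
  | some (f, _) => some f
  | none => st.2.map Prod.fst

-- ===== PRECONDITION & SPEC =====
def Spec_pick_main_file (files_json : List (String × List (List (String × Int)))) (out : Option (List (String × Int))) : Prop := out = pick_main_file_alt files_json
instance (files_json : List (String × List (List (String × Int)))) (out : Option (List (String × Int))) : Decidable (Spec_pick_main_file files_json out) := by unfold Spec_pick_main_file; infer_instance

-- ===== CLAIM (what is proved, stated in full; the proofs are below) =====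
def Claim_equal_pick_main_file : Prop := ∀ (files_json : List (String × List (List (String × Int)))), Dom_pick_main_file files_json → Spec_pick_main_file files_json (pick_main_file files_json)

-- ===== LEMMAS AND PROOFS =====

-- the running first-max step ('update only on a strictly larger key')
def pvStep (acc : Option pvFile) (x : pvFile) : Option pvFile :=
  match acc with
  | none => some x
  | some m => if pvKey m < pvKey x then some x else some m

theorem pvMax_eq_foldl_step (xs : List pvFile) :
    PySem.List.max? xs pvKey = xs.foldl pvStep none := by
  unfold PySem.List.max?
  apply PySem.List.foldl_congr_mem
  intro acc x _
  cases acc <;> rfl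

-- head of a reverse-insertion step: x wins exactly on a strictly larger key
theorem pvHead_insertBy (x : pvFile) (ys : List pvFile) :
    (PySem.List.insertBy (fun a b => decide (pvKey b < pvKey a)) x ys).head? =
      some (match ys.head? with
            | none => x
            | some y => if pvKey y < pvKey x then x else y) := by
  cases ys with
  | nil => simp [PySem.List.insertBy]
  | cons y t =>
      simp only [PySem.List.insertBy, List.head?]
      split_ifs with h <;> simp_all

-- the head of the stable reverse insertion-sort fold is the running first-max fold
theorem pvFoldl_insertBy_head (xs : List pvFile) (acc : List pvFile) :
    (xs.foldl (fun acc x => PySem.List.insertBy (fun a b => decide (pvKey b < pvKey a)) x acc) acc).head? =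
      xs.foldl pvStep acc.head? := by
  induction xs generalizing acc with
  | nil => rfl
  | cons x t ih =>
      simp only [List.foldl_cons]
      rw [ih, pvHead_insertBy]
      cases acc <;> simp [pvStep]
      split_ifs <;> rfl

-- head of sorted(xs, key, reverse=True) is PySem.List.max? (the FIRST element of greatest key)
theorem pvSorted_rev_head (xs : List pvFile) :
    (PySem.List.sorted xs pvKey true).head? = PySem.List.max? xs pvKey := by
  rw [PySem.List.sorted_rev_eq_foldl_insertBy, pvMax_eq_foldl_step]
  exact pvFoldl_insertBy_head xs []

-- B's (file, timestamp) fold is max? under the pairing invariant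
theorem pvBest_eq_max (xs : List pvFile) (a : Option pvFile) :
    xs.foldl pvBest (a.map (fun f => (f, pvKey f))) =
      (xs.foldl pvStep a).map (fun f => (f, pvKey f)) := by
  induction xs generalizing a with
  | nil => rfl
  | cons x t ih =>
      simp only [List.foldl_cons]
      have hstep : pvBest (a.map (fun f => (f, pvKey f))) x =
          (pvStep a x).map (fun f => (f, pvKey f)) := by
        cases a with
        | none => rfl
        | some m => simp only [Option.map_some, pvBest, pvStep]; split_ifs <;> rfl
      rw [hstep, ← ih]

theorem pvBest_eq_max' (xs : List pvFile) :
    xs.foldl pvBest none = (PySem.List.max? xs pvKey).map (fun f => (f, pvKey f)) :=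
by rw [pvMax_eq_foldl_step]; exact pvBest_eq_max xs none

-- xs[0] is the head on a nonempty list
theorem pvPyGet_zero (xs : List pvFile) : PySem.List.pyGet? xs 0 = xs.head? := by
  cases xs <;> simp [PySem.List.pyGet?, PySem.List.pyIdx?]

-- ===== VERDICT (by name: the statement is the Claim_ definition above) =====
theorem pick_main_file_spec : Claim_equal_pick_main_file := by
  intro files_json _
  unfold Spec_pick_main_file pick_main_file pick_main_file_alt
  simp only [PySem.List.foldl_prod_mk (f := fun s e => if pvIsMain e then pvBest s e else s) (g := pvBest),
      PySem.List.foldl_if_eq_foldl_filter, pvBest_eq_max']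
  generalize PySem.Dict.getD (PySem.Dict.mk files_json) "files" ([] : List pvFile) = files
  by_cases hm : files.filter pvIsMain = []
  · rw [hm]
    have h0 : PySem.List.max? ([] : List pvFile) pvKey = none := rfl
    simp only [h0, Option.map_none, if_true]
    by_cases hf : files = []
    · subst hf; simp
    · rw [if_neg hf, pvPyGet_zero, pvSorted_rev_head]
      cases h : PySem.List.max? files pvKey with
      | none => exact absurd ((PySem.List.max?_eq_none_iff files pvKey).mp h) hf
      | some m => simp
  · have hmains : (if files.filter pvIsMain = [] then files else files.filter pvIsMain) =
        files.filter pvIsMain := if_neg hm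
    rw [hmains, if_neg hm, pvPyGet_zero, pvSorted_rev_head]
    cases h : PySem.List.max? (files.filter pvIsMain) pvKey with
    | none => exact absurd ((PySem.List.max?_eq_none_iff (files.filter pvIsMain) pvKey).mp h) hm
    | some m => simp
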